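-- pv_equiv track=rewrite | github.com/Astro-Sean/autophot | functions.py | parse_supported_filter_group_key
-- ===== SOURCE A (Python) =====
-- SUPPORTED_FILTER_GROUPS = {
--     "UBVRI": tuple("UBVRI"),
--     "ugriz": tuple("ugriz"),
--     "JHK": tuple("JHK"),
--     "extended": tuple("Yw"),  # Extended filters (Y-band, w-band)
-- }
--
-- _COMPOSITE_FILTER_GROUP_KEYS = {
--     "grizjhk": tuple("grizJHK"),  # g,r,i,z,J,H,K (matches common refcat / Pan-STARRS+2MASS style maps)
--     "ugrizjhk": tuple("ugrizJHK"),  # u,g,r,i,z,J,H,K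
--     "grizjhkYw": tuple("grizJHKYw"),  # g,r,i,z,J,H,K,Y,w (extended filter set)
--     "ugrizjhkYw": tuple("ugrizJHKYw"),  # u,g,r,i,z,J,H,K,Y,w (extended filter set)
-- }
--
-- def parse_supported_filter_group_key(group_key):
--     """
--     Parse a mapping-group key into explicit supported bands.
--
--     Accepted examples:
--       - Full groups: "UBVRI", "ugriz", "JHK"
--       - Valid subsets/singletons of one family: "griz", "u", "BV", "HK"
--       - Composite keys: "grizJHK", "ugrizJHK" (optical + JHK for catalog.use_catalog maps)
--     Rejected:
--       - Mixed-family tokens: "uBV", "rJ"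
--       - Unsupported tokens/bands.
--     """
--     if group_key is None:
--         return None
--     key = str(group_key).strip()
--     if key == "":
--         return None
--
--     # Fast path for canonical full-group keys.
--     if key in SUPPORTED_FILTER_GROUPS:
--         return tuple(SUPPORTED_FILTER_GROUPS[key])
--
--     comp = _COMPOSITE_FILTER_GROUP_KEYS.get(key.lower())
--     if comp is not None:
--         return comp
--
--     # Support subsets of exactly one canonical family.
--     for family_bands in SUPPORTED_FILTER_GROUPS.values():
--         fam_set = set(family_bands)
--         if all(ch in fam_set for ch in key):
--             ordered = []
--             seen = set()
--             for ch in key: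
--                 if ch not in seen:
--                     ordered.append(ch)
--                     seen.add(ch)
--             return tuple(ordered)
--     return None
-- ===== SOURCE B (Python) =====
-- SUPPORTED_FILTER_GROUPS = {
--     "UBVRI": tuple("UBVRI"),
--     "ugriz": tuple("ugriz"),
--     "JHK": tuple("JHK"),
--     "extended": tuple("Yw"),  # Extended filters (Y-band, w-band)
-- }
--
-- _COMPOSITE_FILTER_GROUP_KEYS = {
--     "grizjhk": tuple("grizJHK"),
--     "ugrizjhk": tuple("ugrizJHK"),
--     "grizjhkYw": tuple("grizJHKYw"),
--     "ugrizjhkYw": tuple("ugrizJHKYw"),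
-- }
--
-- # Inverted index built once: band character -> name of the (unique) family owning it.
-- _CHAR_FAMILY = {
--     ch: name for name, bands in SUPPORTED_FILTER_GROUPS.items() for ch in bands
-- }
--
--
-- def parse_supported_filter_group_key(group_key):
--     if group_key is None:
--         return None
--     key = str(group_key).strip()
--     if key == "":
--         return None
--
--     if key in SUPPORTED_FILTER_GROUPS:
--         return tuple(SUPPORTED_FILTER_GROUPS[key])
--
--     comp = _COMPOSITE_FILTER_GROUP_KEYS.get(key.lower())
--     if comp is not None:
--         return comp
--
--     # One pass: the set of families the key's characters belong to
--     # (None marks a character outside every family).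
--     families = {_CHAR_FAMILY.get(ch) for ch in key}
--     if len(families) == 1 and None not in families:
--         return tuple(dict.fromkeys(key))
--     return None
-- ===== Notes on version B (the rewrite author's own statement) =====
-- stated objective: idiomatic
-- what changed: The per-family scan (4 passes re-checking every key character against each family set, plus a seen-set dedup loop) is replaced by one inverted char->family map built once: a single pass maps each character to its family, the key is accepted iff exactly one family and no unknown character appears, and dict.fromkeys does the ordered dedup.
import Mathlib
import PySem

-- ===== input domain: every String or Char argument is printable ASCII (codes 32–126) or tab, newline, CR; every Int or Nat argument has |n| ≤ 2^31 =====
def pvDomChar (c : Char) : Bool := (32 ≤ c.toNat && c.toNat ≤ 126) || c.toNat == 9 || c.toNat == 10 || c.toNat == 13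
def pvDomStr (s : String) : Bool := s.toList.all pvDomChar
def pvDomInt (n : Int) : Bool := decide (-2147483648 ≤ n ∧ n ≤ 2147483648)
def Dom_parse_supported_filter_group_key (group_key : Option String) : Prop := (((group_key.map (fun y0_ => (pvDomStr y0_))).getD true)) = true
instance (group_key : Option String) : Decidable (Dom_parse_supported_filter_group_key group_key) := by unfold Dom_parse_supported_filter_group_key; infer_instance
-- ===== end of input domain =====

-- B replaces A's per-family scans plus hand-rolled seen-set dedup loop by a single pass
-- through an inverted char→family map built once, with dict.fromkeys as the ordered dedup.

-- module-level constants shared by both implementations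
def pvGroups : PySem.Dict String (List String) :=
  PySem.Dict.ofList
    [("UBVRI", ["U","B","V","R","I"]),
     ("ugriz", ["u","g","r","i","z"]),
     ("JHK", ["J","H","K"]),
     ("extended", ["Y","w"])]

def pvComposite : PySem.Dict String (List String) :=
  PySem.Dict.ofList
    [("grizjhk", ["g","r","i","z","J","H","K"]),
     ("ugrizjhk", ["u","g","r","i","z","J","H","K"]),
     ("grizjhkYw", ["g","r","i","z","J","H","K","Y","w"]),
     ("ugrizjhkYw", ["u","g","r","i","z","J","H","K","Y","w"])]

-- ===== PORT A =====
-- the ordered/seen dedup loop of A's subset branch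
def pvDedupLoopA : List Char → PySem.Set String → List String → List String
  | [], _, ordered => ordered
  | c :: rest, seen, ordered =>
    if PySem.Set.contains seen (String.ofList [c]) then pvDedupLoopA rest seen ordered
    else pvDedupLoopA rest (PySem.Set.add seen (String.ofList [c])) (ordered ++ [String.ofList [c]])

-- 'for family_bands in SUPPORTED_FILTER_GROUPS.values(): …'
def pvFamilyLoopA : List (List String) → List Char → Option (List String)
  | [], _ => none
  | bands :: rest, chars =>
    if chars.all (fun c => PySem.Set.contains (PySem.Set.ofList bands) (String.ofList [c])) then
      some (pvDedupLoopA chars PySem.Set.empty [])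
    else pvFamilyLoopA rest chars

-- A's body once group_key is not None and key = str(group_key).strip() is computed
def pvParseKeyA (key : String) : Option (List String) :=
  if key = "" then none
  else
    match PySem.Dict.get? pvGroups key with
    | some bands => some bands
    | none =>
      match PySem.Dict.get? pvComposite (PySem.Str.lower key) with
      | some comp => some comp
      | none => pvFamilyLoopA (PySem.Dict.values pvGroups) key.toList

def parse_supported_filter_group_key (group_key : Option String) : Option (List String) :=
  match group_key with
  | none => none
  | some gk => pvParseKeyA (PySem.Str.strip gk)

-- ===== PORT B =====
-- inverted index built once: band character -> name of the (unique) family owning it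
def pvCharFamily : PySem.Dict Char String :=
  PySem.Dict.ofList
    [('U',"UBVRI"),('B',"UBVRI"),('V',"UBVRI"),('R',"UBVRI"),('I',"UBVRI"),
     ('u',"ugriz"),('g',"ugriz"),('r',"ugriz"),('i',"ugriz"),('z',"ugriz"),
     ('J',"JHK"),('H',"JHK"),('K',"JHK"),
     ('Y',"extended"),('w',"extended")]

-- B's body once group_key is not None and key is computed
def pvParseKeyB (key : String) : Option (List String) :=
  if key = "" then none
  else
    match PySem.Dict.get? pvGroups key with
    | some bands => some bands
    | none =>
      match PySem.Dict.get? pvComposite (PySem.Str.lower key) with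
      | some comp => some comp
      | none =>
        let families : PySem.Set (Option String) :=
          PySem.Set.ofList (key.toList.map (fun c => PySem.Dict.get? pvCharFamily c))
        if PySem.Set.len families = 1 ∧ ¬ (PySem.Set.contains families none = true) then
          some (PySem.List.dedup (key.toList.map (fun c => String.ofList [c])))
        else none

def parse_supported_filter_group_key_alt (group_key : Option String) : Option (List String) :=
  match group_key with
  | none => none
  | some gk => pvParseKeyB (PySem.Str.strip gk)

-- ===== PRECONDITION & SPEC =====
def Spec_parse_supported_filter_group_key (group_key : Option String) (out : Option (List String)) : Prop := out = parse_supported_filter_group_key_alt group_key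
instance (group_key : Option String) (out : Option (List String)) : Decidable (Spec_parse_supported_filter_group_key group_key out) := by unfold Spec_parse_supported_filter_group_key; infer_instance

-- ===== CLAIM (what is proved, stated in full; the proofs are below) =====
def Claim_equal_parse_supported_filter_group_key : Prop := ∀ (group_key : Option String), Dom_parse_supported_filter_group_key group_key → Spec_parse_supported_filter_group_key group_key (parse_supported_filter_group_key group_key)

-- ===== LEMMAS AND PROOFS =====

theorem pvSingEq (c : Char) (s : String) : String.ofList [c] = s ↔ [c] = s.toList := by
  constructor
  · intro h; rw [← h]; simp
  · intro h; simpa using congrArg String.ofList h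

theorem pvCharFamily_mk : pvCharFamily = PySem.Dict.mk
    [('U',"UBVRI"),('B',"UBVRI"),('V',"UBVRI"),('R',"UBVRI"),('I',"UBVRI"),
     ('u',"ugriz"),('g',"ugriz"),('r',"ugriz"),('i',"ugriz"),('z',"ugriz"),
     ('J',"JHK"),('H',"JHK"),('K',"JHK"),
     ('Y',"extended"),('w',"extended")] := by decide

def pvAllBandChars : List Char := ['U','B','V','R','I','u','g','r','i','z','J','H','K','Y','w']

theorem pvFamTag_none (c : Char) (h : c ∉ pvAllBandChars) :
    PySem.Dict.get? pvCharFamily c = none := by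
  rw [PySem.Dict.get?_eq_none_iff_not_mem_keys, pvCharFamily_mk]
  simpa [pvAllBandChars] using h

theorem pvFam_iff (bands : List String) (tag : String)
    (hmem : ∀ c : Char, c ∈ pvAllBandChars →
      ((PySem.Set.contains (PySem.Set.ofList bands) (String.ofList [c]) = true) ↔
        PySem.Dict.get? pvCharFamily c = some tag))
    (hout : ∀ c : Char, c ∉ pvAllBandChars → ¬ String.ofList [c] ∈ bands) (c : Char) :
    (PySem.Set.contains (PySem.Set.ofList bands) (String.ofList [c]) = true) ↔
      PySem.Dict.get? pvCharFamily c = some tag := by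
  by_cases h : c ∈ pvAllBandChars
  · exact hmem c h
  · rw [pvFamTag_none c h]
    constructor
    · intro hc
      exact absurd ((PySem.Set.mem_ofList _ _).mp ((PySem.Set.contains_iff _ _).mp hc)) (hout c h)
    · intro hc; exact absurd hc (by simp)

theorem pvFam1 (c : Char) :
    (PySem.Set.contains (PySem.Set.ofList ["U","B","V","R","I"]) (String.ofList [c]) = true) ↔
      PySem.Dict.get? pvCharFamily c = some "UBVRI" := by
  refine pvFam_iff _ _ (fun c h => ?_) (fun c h => ?_) c
  · fin_cases h <;> decide
  · intro hmem
    apply h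
    simp only [pvAllBandChars]
    simp only [List.mem_cons, List.not_mem_nil, or_false] at hmem
    rcases hmem with h1 | h1 | h1 | h1 | h1 <;> rw [pvSingEq] at h1 <;> simp_all

theorem pvFam2 (c : Char) :
    (PySem.Set.contains (PySem.Set.ofList ["u","g","r","i","z"]) (String.ofList [c]) = true) ↔
      PySem.Dict.get? pvCharFamily c = some "ugriz" := by
  refine pvFam_iff _ _ (fun c h => ?_) (fun c h => ?_) c
  · fin_cases h <;> decide
  · intro hmem
    apply h
    simp only [pvAllBandChars]
    simp only [List.mem_cons, List.not_mem_nil, or_false] at hmem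
    rcases hmem with h1 | h1 | h1 | h1 | h1 <;> rw [pvSingEq] at h1 <;> simp_all

theorem pvFam3 (c : Char) :
    (PySem.Set.contains (PySem.Set.ofList ["J","H","K"]) (String.ofList [c]) = true) ↔
      PySem.Dict.get? pvCharFamily c = some "JHK" := by
  refine pvFam_iff _ _ (fun c h => ?_) (fun c h => ?_) c
  · fin_cases h <;> decide
  · intro hmem
    apply h
    simp only [pvAllBandChars]
    simp only [List.mem_cons, List.not_mem_nil, or_false] at hmem
    rcases hmem with h1 | h1 | h1 <;> rw [pvSingEq] at h1 <;> simp_all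

theorem pvFam4 (c : Char) :
    (PySem.Set.contains (PySem.Set.ofList ["Y","w"]) (String.ofList [c]) = true) ↔
      PySem.Dict.get? pvCharFamily c = some "extended" := by
  refine pvFam_iff _ _ (fun c h => ?_) (fun c h => ?_) c
  · fin_cases h <;> decide
  · intro hmem
    apply h
    simp only [pvAllBandChars]
    simp only [List.mem_cons, List.not_mem_nil, or_false] at hmem
    rcases hmem with h1 | h1 <;> rw [pvSingEq] at h1 <;> simp_all

theorem pvFamTag_range (c : Char) :
    PySem.Dict.get? pvCharFamily c = none ∨
    PySem.Dict.get? pvCharFamily c = some "UBVRI" ∨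
    PySem.Dict.get? pvCharFamily c = some "ugriz" ∨
    PySem.Dict.get? pvCharFamily c = some "JHK" ∨
    PySem.Dict.get? pvCharFamily c = some "extended" := by
  by_cases h : c ∈ pvAllBandChars
  · fin_cases h <;> simp [pvCharFamily_mk] <;> decide
  · exact Or.inl (pvFamTag_none c h)

-- A's seen/ordered loop is a fold of Set.add once seen and ordered coincide (they do: both
-- start empty and append the same element at the same step)
theorem pvDedupLoopA_eq (l : List Char) :
    ∀ s : PySem.Set String, pvDedupLoopA l s s = (l.map fun c => String.ofList [c]).foldl PySem.Set.add s := by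
  induction l with
  | nil => intro s; simp [pvDedupLoopA]
  | cons c rest ih =>
    intro s
    simp only [pvDedupLoopA, List.map_cons, List.foldl_cons]
    by_cases h : PySem.Set.contains s (String.ofList [c]) = true
    · have hadd : PySem.Set.add s (String.ofList [c]) = s :=
        PySem.Set.add_of_mem ((PySem.Set.contains_iff _ _).mp h)
      rw [if_pos h, hadd, ih]
    · have hmem : String.ofList [c] ∉ s := fun hm => h ((PySem.Set.contains_iff _ _).mpr hm)
      rw [if_neg h, PySem.Set.add_of_not_mem hmem, ← PySem.Set.add_of_not_mem hmem, ih]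

theorem pvOfList_const {α : Type} [BEq α] [LawfulBEq α] (v : α) (m : List α)
    (hne : m ≠ []) (hall : ∀ x ∈ m, x = v) : PySem.Set.ofList m = [v] := by
  cases m with
  | nil => exact absurd rfl hne
  | cons x xs =>
    rw [PySem.Set.ofList_cons, hall x (by simp)]
    have : PySem.Set.discard (PySem.Set.ofList xs) v = [] := by
      apply List.eq_nil_iff_forall_not_mem.mpr
      intro y hy
      have := (PySem.Set.mem_discard _ _ _).mp hy
      exact this.2 (hall y (List.mem_cons_of_mem x ((PySem.Set.mem_ofList xs y).mp this.1)))
    rw [this]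

-- the heart of the equivalence: on a nonempty key, A's 4-family scan equals B's
-- single-pass inverted-map test
theorem pvSubset_eq (l : List Char) (hne : l ≠ []) :
    pvFamilyLoopA (PySem.Dict.values pvGroups) l =
      (if PySem.Set.len (PySem.Set.ofList (l.map (fun c => PySem.Dict.get? pvCharFamily c))) = 1
          ∧ ¬ (PySem.Set.contains (PySem.Set.ofList (l.map (fun c => PySem.Dict.get? pvCharFamily c))) none = true)
       then some (PySem.List.dedup (l.map (fun c => String.ofList [c])))
       else none) := by
  have hv : PySem.Dict.values pvGroups =
      [["U","B","V","R","I"], ["u","g","r","i","z"], ["J","H","K"], ["Y","w"]] := by decide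
  have hdedup : pvDedupLoopA l [] [] =
      PySem.List.dedup (l.map fun c => String.ofList [c]) := by
    rw [pvDedupLoopA_eq l ([] : PySem.Set String), PySem.List.dedup_eq_ofList,
        PySem.Set.ofList_eq_foldl]
  have hmne : l.map (fun c => PySem.Dict.get? pvCharFamily c) ≠ [] := by
    simpa using hne
  -- helper: when every char maps to 'tag', B's condition holds with set [some tag]
  have hconst : ∀ tag : String, (∀ c ∈ l, PySem.Dict.get? pvCharFamily c = some tag) →
      PySem.Set.ofList (l.map (fun c => PySem.Dict.get? pvCharFamily c)) = [some tag] := by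
    intro tag htag
    apply pvOfList_const _ _ hmne
    intro x hx
    obtain ⟨c, hc, rfl⟩ := List.mem_map.mp hx
    exact htag c hc
  rw [hv]
  by_cases h1 : l.all (fun c => PySem.Set.contains (PySem.Set.ofList ["U","B","V","R","I"]) (String.ofList [c])) = true
  · have hall : ∀ c ∈ l, PySem.Dict.get? pvCharFamily c = some "UBVRI" :=
      fun c hc => (pvFam1 c).mp (List.all_eq_true.mp h1 c hc)
    rw [hconst _ hall]
    rw [if_pos (by decide)]
    simp only [pvFamilyLoopA]
    rw [if_pos h1]
    exact congrArg some hdedup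
  · by_cases h2 : l.all (fun c => PySem.Set.contains (PySem.Set.ofList ["u","g","r","i","z"]) (String.ofList [c])) = true
    · have hall : ∀ c ∈ l, PySem.Dict.get? pvCharFamily c = some "ugriz" :=
        fun c hc => (pvFam2 c).mp (List.all_eq_true.mp h2 c hc)
      rw [hconst _ hall]
      rw [if_pos (by decide)]
      simp only [pvFamilyLoopA]
      rw [if_neg h1, if_pos h2]
      exact congrArg some hdedup
    · by_cases h3 : l.all (fun c => PySem.Set.contains (PySem.Set.ofList ["J","H","K"]) (String.ofList [c])) = true
      · have hall : ∀ c ∈ l, PySem.Dict.get? pvCharFamily c = some "JHK" :=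
          fun c hc => (pvFam3 c).mp (List.all_eq_true.mp h3 c hc)
        rw [hconst _ hall]
        rw [if_pos (by decide)]
        simp only [pvFamilyLoopA]
        rw [if_neg h1, if_neg h2, if_pos h3]
        exact congrArg some hdedup
      · by_cases h4 : l.all (fun c => PySem.Set.contains (PySem.Set.ofList ["Y","w"]) (String.ofList [c])) = true
        · have hall : ∀ c ∈ l, PySem.Dict.get? pvCharFamily c = some "extended" :=
            fun c hc => (pvFam4 c).mp (List.all_eq_true.mp h4 c hc)
          rw [hconst _ hall]
          rw [if_pos (by decide)]
          simp only [pvFamilyLoopA]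
          rw [if_neg h1, if_neg h2, if_neg h3, if_pos h4]
          exact congrArg some hdedup
        · -- no family contains every character: both sides are none
          have hcond : ¬ (PySem.Set.len (PySem.Set.ofList (l.map (fun c => PySem.Dict.get? pvCharFamily c))) = 1
              ∧ ¬ (PySem.Set.contains (PySem.Set.ofList (l.map (fun c => PySem.Dict.get? pvCharFamily c))) none = true)) := by
            rintro ⟨hlen, hnone⟩
            have hlen' : (PySem.Set.ofList (l.map (fun c => PySem.Dict.get? pvCharFamily c)) : List (Option String)).length = 1 := by
              simpa [PySem.Set.len] using hlen
            obtain ⟨v, hS⟩ := List.length_eq_one_iff.mp hlen'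
            have hvmem : v ∈ l.map (fun c => PySem.Dict.get? pvCharFamily c) := by
              have : v ∈ PySem.Set.ofList (l.map (fun c => PySem.Dict.get? pvCharFamily c)) := by
                rw [hS]; simp
              exact (PySem.Set.mem_ofList _ _).mp this
            obtain ⟨c0, hc0, hvc0⟩ := List.mem_map.mp hvmem
            have hallv : ∀ c ∈ l, PySem.Dict.get? pvCharFamily c = v := by
              intro c hc
              have : PySem.Dict.get? pvCharFamily c ∈
                  PySem.Set.ofList (l.map (fun c => PySem.Dict.get? pvCharFamily c)) :=
                (PySem.Set.mem_ofList _ _).mpr (List.mem_map.mpr ⟨c, hc, rfl⟩)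
              rw [hS] at this
              simpa using this
            have hvne : v ≠ none := by
              intro hveq
              apply hnone
              apply (PySem.Set.contains_iff _ _).mpr
              rw [hS, hveq]; simp
            rcases pvFamTag_range c0 with hr | hr | hr | hr | hr
            · exact hvne (hvc0.symm.trans hr)
            all_goals {
              first
              | exact h1 (List.all_eq_true.mpr (fun c hc => (pvFam1 c).mpr ((hallv c hc).trans (hvc0.symm.trans hr))))
              | exact h2 (List.all_eq_true.mpr (fun c hc => (pvFam2 c).mpr ((hallv c hc).trans (hvc0.symm.trans hr))))
              | exact h3 (List.all_eq_true.mpr (fun c hc => (pvFam3 c).mpr ((hallv c hc).trans (hvc0.symm.trans hr))))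
              | exact h4 (List.all_eq_true.mpr (fun c hc => (pvFam4 c).mpr ((hallv c hc).trans (hvc0.symm.trans hr))))
            }
          simp only [pvFamilyLoopA]
          rw [if_neg h1, if_neg h2, if_neg h3, if_neg h4, if_neg hcond]

theorem pvBody_eq (key : String) : pvParseKeyA key = pvParseKeyB key := by
  unfold pvParseKeyA pvParseKeyB
  by_cases h : key = ""
  · rw [if_pos h, if_pos h]
  · rw [if_neg h, if_neg h]
    cases PySem.Dict.get? pvGroups key with
    | some bands => rfl
    | none =>
      cases PySem.Dict.get? pvComposite (PySem.Str.lower key) with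
      | some comp => rfl
      | none =>
        have hne : key.toList ≠ [] := by
          intro hl
          exact h (by simpa using congrArg String.ofList hl)
        exact pvSubset_eq key.toList hne

-- ===== VERDICT (by name: the statement is the Claim_ definition above) =====
theorem parse_supported_filter_group_key_spec : Claim_equal_parse_supported_filter_group_key := by
  intro gk _
  unfold Spec_parse_supported_filter_group_key parse_supported_filter_group_key parse_supported_filter_group_key_alt
  cases gk with
  | none => rfl
  | some s => exact pvBody_eq (PySem.Str.strip s)
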